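-- pv_equiv track=rewrite | github.com/BrayanAlv/Api-Flask-Angel-Care | IA_Training/generate_pediatric_data.py | filtrar_sql
-- ===== SOURCE A (Python) =====
-- TABLAS_IGNORADAS = ["accelerometer_readings", "audio_recordings"]
--
-- def filtrar_sql(contenido_original):
--     lineas = contenido_original.split('\n')
--     sql_limpio = []
--     bloque_a_ignorar = False
--
--     for linea in lineas:
--         # Detectar tablas prohibidas
--         for tabla in TABLAS_IGNORADAS:
--             if f"`{tabla}`" in linea:
--                  if any(cmd in linea for cmd in ["CREATE TABLE", "INSERT INTO", "LOCK TABLES", "ALTER TABLE", "DROP TABLE"]):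
--                     bloque_a_ignorar = True
--                     break
--
--         # Detectar la tabla readings ORIGINAL (La vamos a borrar para usar nuestra estructura forzada)
--         if "`readings`" in linea and "CREATE TABLE" in linea:
--             bloque_a_ignorar = True
--
--         if bloque_a_ignorar:
--             if ";" in linea or "UNLOCK TABLES" in linea:
--                 bloque_a_ignorar = False
--             continue
--         sql_limpio.append(linea)
--     return "\n".join(sql_limpio)
-- ===== SOURCE B (Python) =====
-- TABLAS_IGNORADAS = ["accelerometer_readings", "audio_recordings"]
--
-- _COMANDOS = ["CREATE TABLE", "INSERT INTO", "LOCK TABLES", "ALTER TABLE", "DROP TABLE"]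
--
--
-- def _abre_bloque(linea):
--     if any(f"`{t}`" in linea for t in TABLAS_IGNORADAS) and \
--        any(cmd in linea for cmd in _COMANDOS):
--         return True
--     return "`readings`" in linea and "CREATE TABLE" in linea
--
--
-- def filtrar_sql(contenido_original):
--     lineas = contenido_original.split('\n')
--     n = len(lineas)
--     # prefix[i] = number of block-start lines among lineas[:i]
--     prefix = [0]
--     acc = 0
--     for l in lineas:
--         if _abre_bloque(l):
--             acc += 1
--         prefix.append(acc)
--     # last_term[i] = 1 + index of the last terminator line strictly before i (0 if none)
--     last_term = [0]
--     lt = 0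
--     for i in range(n - 1):
--         if ';' in lineas[i] or 'UNLOCK TABLES' in lineas[i]:
--             lt = i + 1
--         last_term.append(lt)
--     # line i is kept iff no block-start line occurs in lineas[last_term[i] .. i]
--     kept = [l for i, l in enumerate(lineas)
--             if prefix[i + 1] == prefix[last_term[i]]]
--     return '\n'.join(kept)
-- ===== Notes on version B (the rewrite author's own statement) =====
-- stated objective: alternative
-- what changed: Replaces A's carried boolean skip-flag state machine by a staged, stateless formulation: one pass builds a prefix-count table of block-start lines and a last-terminator-index table, then each line i is kept by the closed test prefix[i+1] == prefix[last_term[i]] (no block-start since the last terminator before i).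
import Mathlib
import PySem

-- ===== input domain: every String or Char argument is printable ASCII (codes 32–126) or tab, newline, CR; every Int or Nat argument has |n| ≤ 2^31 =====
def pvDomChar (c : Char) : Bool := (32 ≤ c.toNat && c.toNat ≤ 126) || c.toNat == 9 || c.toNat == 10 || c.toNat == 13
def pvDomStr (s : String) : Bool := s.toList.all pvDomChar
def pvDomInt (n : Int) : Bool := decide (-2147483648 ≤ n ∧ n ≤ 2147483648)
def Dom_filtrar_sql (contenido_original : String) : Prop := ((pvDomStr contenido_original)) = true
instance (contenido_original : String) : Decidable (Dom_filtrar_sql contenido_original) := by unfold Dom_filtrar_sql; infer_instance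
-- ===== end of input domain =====

-- B replaces A's carried skip-flag state machine by staged prefix-count / last-terminator tables
-- and a stateless per-line keep test (alternative decomposition; same O(n) cost).

def pvTablas : List String := ["accelerometer_readings", "audio_recordings"]
def pvCmds : List String := ["CREATE TABLE", "INSERT INTO", "LOCK TABLES", "ALTER TABLE", "DROP TABLE"]

-- ===== PORT A =====
-- the inner `for tabla in TABLAS_IGNORADAS` loop with its break
def pvDetect (linea : String) (flag : Bool) : List String → Bool
  | [] => flag
  | t :: ts =>
      if PySem.Str.isIn ("`" ++ t ++ "`") linea then
        if pvCmds.any (fun c => PySem.Str.isIn c linea) then true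
        else pvDetect linea flag ts
      else pvDetect linea flag ts

def pvStepA (st : Bool × List String) (linea : String) : Bool × List String :=
  let flag1 := pvDetect linea st.1 pvTablas
  let flag2 := if PySem.Str.isIn "`readings`" linea && PySem.Str.isIn "CREATE TABLE" linea then true else flag1
  if flag2 then
    (if PySem.Str.isIn ";" linea || PySem.Str.isIn "UNLOCK TABLES" linea then false else true, st.2)
  else
    (flag2, st.2 ++ [linea])

def filtrar_sql (contenido_original : String) : String :=
  let lineas := (PySem.Str.split? contenido_original "\n").getD []
  PySem.Str.join "\n" (lineas.foldl pvStepA (false, [])).2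

-- ===== PORT B =====
def pvAbre (linea : String) : Bool :=
  if pvTablas.any (fun t => PySem.Str.isIn ("`" ++ t ++ "`") linea) &&
     pvCmds.any (fun c => PySem.Str.isIn c linea) then true
  else PySem.Str.isIn "`readings`" linea && PySem.Str.isIn "CREATE TABLE" linea

def pvTerm (linea : String) : Bool :=
  PySem.Str.isIn ";" linea || PySem.Str.isIn "UNLOCK TABLES" linea

def filtrar_sql_alt (contenido_original : String) : String :=
  let lineas := (PySem.Str.split? contenido_original "\n").getD []
  let n : Int := PySem.List.len lineas
  -- prefix[i] = number of block-start lines among lineas[:i]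
  let pf := (lineas.foldl (fun (st : List Int × Int) l =>
      let a := if pvAbre l then st.2 + 1 else st.2
      (st.1 ++ [a], a)) ([0], 0)).1
  -- last_term[i] = 1 + index of the last terminator line strictly before i (0 if none)
  let lt := ((PySem.List.pyRange 0 (n - 1) 1).foldl (fun (st : List Int × Int) i =>
      let v := if pvTerm (PySem.List.pyGetD lineas i "") then i + 1 else st.2
      (st.1 ++ [v], v)) ([0], 0)).1
  -- line i is kept iff no block-start line occurs in lineas[last_term[i] .. i]
  let kept := ((PySem.List.enumerate lineas).filter (fun p =>
      PySem.List.pyGetD pf (p.1 + 1) 0 == PySem.List.pyGetD pf (PySem.List.pyGetD lt p.1 0) 0)).map (·.2)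
  PySem.Str.join "\n" kept

-- ===== PRECONDITION & SPEC =====
def Spec_filtrar_sql (contenido_original : String) (out : String) : Prop := out = filtrar_sql_alt contenido_original
instance (contenido_original : String) (out : String) : Decidable (Spec_filtrar_sql contenido_original out) := by unfold Spec_filtrar_sql; infer_instance

-- ===== CLAIM (what is proved, stated in full; the proofs are below) =====
def Claim_equal_filtrar_sql : Prop := ∀ (contenido_original : String), Dom_filtrar_sql contenido_original → Spec_filtrar_sql contenido_original (filtrar_sql contenido_original)

-- ===== LEMMAS AND PROOFS =====

-- A's loop as a structural recursion on the lines with the carried flag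
def pvRun (f : Bool) : List String → List String
  | [] => []
  | l :: ls =>
      if f || pvAbre l then pvRun (!pvTerm l) ls
      else l :: pvRun false ls

-- the flag A carries when entering line i
def pvF (ls : List String) : Nat → Bool
  | 0 => false
  | i + 1 => (pvF ls i || pvAbre (ls.getD i "")) && !pvTerm (ls.getD i "")

-- 1 + index of the last terminator strictly before i
def pvLT (ls : List String) : Nat → Nat
  | 0 => 0
  | i + 1 => if pvTerm (ls.getD i "") then i + 1 else pvLT ls i

-- number of block-start lines among the first k
def pvCnt (ls : List String) (k : Nat) : Nat := (ls.take k).countP pvAbre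

theorem pvDetect_true (linea : String) : ∀ ts, pvDetect linea true ts = true := by
  intro ts
  induction ts with
  | nil => rfl
  | cons t ts ih =>
      simp only [pvDetect]
      split
      · split
        · rfl
        · exact ih
      · exact ih

theorem pvDetect_false (linea : String) :
    ∀ ts, pvDetect linea false ts
      = (ts.any (fun t => PySem.Str.isIn ("`" ++ t ++ "`") linea)
         && pvCmds.any (fun c => PySem.Str.isIn c linea)) := by
  intro ts
  induction ts with
  | nil => simp [pvDetect]
  | cons t ts ih =>
      simp only [pvDetect, List.any_cons]
      cases h1 : PySem.Str.isIn ("`" ++ t ++ "`") linea <;>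
        cases h2 : pvCmds.any (fun c => PySem.Str.isIn c linea) <;>
          simp only [Bool.false_eq_true, ih, h2,
            Bool.false_or, Bool.true_or, Bool.and_false, Bool.and_true, if_true, if_false]

theorem pvFlag2_eq_abre (linea : String) :
    (if PySem.Str.isIn "`readings`" linea && PySem.Str.isIn "CREATE TABLE" linea then true
     else pvDetect linea false pvTablas) = pvAbre linea := by
  rw [pvDetect_false]
  unfold pvAbre
  cases h1 : (pvTablas.any (fun t => PySem.Str.isIn ("`" ++ t ++ "`") linea)
       && pvCmds.any (fun c => PySem.Str.isIn c linea)) <;>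
    cases h2 : (PySem.Str.isIn "`readings`" linea && PySem.Str.isIn "CREATE TABLE" linea) <;>
      simp only [Bool.false_eq_true, if_true, if_false]

theorem pvStepA_true (acc : List String) (l : String) :
    pvStepA (true, acc) l = (if pvTerm l then ((false : Bool), acc) else (true, acc)) := by
  simp only [pvStepA, pvDetect_true, pvTerm, ite_self, if_true]
  split <;> rfl

theorem pvStepA_false (acc : List String) (l : String) :
    pvStepA (false, acc) l
      = (if pvAbre l then (if pvTerm l then ((false : Bool), acc) else (true, acc))
         else (false, acc ++ [l])) := by
  simp only [pvStepA, pvFlag2_eq_abre, pvTerm]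
  split
  · split <;> rfl
  · rename_i h
    rw [Bool.not_eq_true] at h
    rw [h]

-- A's foldl computes pvRun
theorem pvFoldl_run : ∀ (ls : List String) (f : Bool) (acc : List String),
    (ls.foldl pvStepA (f, acc)).2 = acc ++ pvRun f ls := by
  intro ls
  induction ls with
  | nil => intro f acc; simp [pvRun]
  | cons l ls ih =>
      intro f acc
      cases f with
      | false =>
          rw [List.foldl_cons, pvStepA_false, pvRun]
          cases ha : pvAbre l
          · simp only [Bool.false_eq_true, reduceIte, Bool.false_or, ih]
            simp
          · simp only [reduceIte, Bool.true_or]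
            cases ht : pvTerm l <;> simp [ih]
      | true =>
          rw [List.foldl_cons, pvStepA_true, pvRun]
          simp only [Bool.true_or, reduceIte]
          cases ht : pvTerm l <;> simp [ih]

theorem pvLT_le (ls : List String) : ∀ i, pvLT ls i ≤ i := by
  intro i
  induction i with
  | zero => simp [pvLT]
  | succ i ih =>
      simp only [pvLT]
      split
      · exact le_refl _
      · exact le_trans ih (Nat.le_succ i)

theorem pvCnt_succ (ls : List String) (i : Nat) (h : i < ls.length) :
    pvCnt ls (i + 1) = pvCnt ls i + (if pvAbre ls[i] then 1 else 0) := by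
  unfold pvCnt
  rw [List.take_succ, List.countP_append]
  simp [List.getElem?_eq_getElem h, List.countP]
  split <;> simp_all [List.countP, List.countP.go]

theorem pvCnt_mono (ls : List String) : ∀ {j k : Nat}, j ≤ k → pvCnt ls j ≤ pvCnt ls k := by
  intro j k h
  unfold pvCnt
  have hj : ls.take j = (ls.take k).take j := by rw [List.take_take, Nat.min_eq_left h]
  rw [hj]
  exact List.Sublist.countP_le (List.take_sublist _ _)

-- flag invariant: the carried flag says "a block-start occurred since the last terminator"
theorem pvF_eq (ls : List String) : ∀ i, i ≤ ls.length →
    pvF ls i = decide (pvCnt ls (pvLT ls i) < pvCnt ls i) := by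
  intro i
  induction i with
  | zero => intro _; simp [pvF, pvLT]
  | succ i ih =>
      intro h
      have hi : i < ls.length := h
      have hget : ls.getD i "" = ls[i] := List.getD_eq_getElem ls "" hi
      have hmono : pvCnt ls (pvLT ls i) ≤ pvCnt ls i := pvCnt_mono ls (pvLT_le ls i)
      simp only [pvF, pvLT, hget, ih (Nat.le_of_lt hi)]
      cases ht : pvTerm ls[i]
      · simp only [Bool.not_false, Bool.and_true, if_neg (by simp [ht] : ¬ pvTerm ls[i] = true)]
        rw [pvCnt_succ ls i hi]
        cases ha : pvAbre ls[i] <;> simp <;> omega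
      · simp only [Bool.not_true, Bool.and_false, if_pos rfl]
        simp

-- ===== VERDICT is at the bottom =====

-- number of block-start lines among the first k+1 of l :: ls
theorem pvCnt_cons (l : String) (ls : List String) (k : Nat) :
    pvCnt (l :: ls) (k + 1) = (if pvAbre l then 1 else 0) + pvCnt ls k := by
  simp only [pvCnt, List.take_succ_cons, List.countP_cons]
  split <;> omega

-- generic Bool extensionality used to compare the two keep tests
theorem pvBoolExt {x y : Bool} (h : x = true ↔ y = true) : x = y := by
  cases x <;> cases y <;> simp_all

theorem pvGetD_map_range (f : Nat → Int) (n k : Nat) (h : k < n) (d : Int) :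
    ((List.range n).map f).getD k d = f k := by
  rw [List.getD_eq_getElem?_getD, List.getElem?_map, List.getElem?_range h]
  rfl

-- characterization of B's prefix table
theorem pvPf_spec (ls : List String) : ∀ (p : List Int) (c : Int),
    ls.foldl (fun (st : List Int × Int) l =>
        let a := if pvAbre l then st.2 + 1 else st.2
        (st.1 ++ [a], a)) (p, c)
      = (p ++ (List.range ls.length).map (fun k => c + (pvCnt ls (k + 1) : Int)),
         c + (pvCnt ls ls.length : Int)) := by
  induction ls with
  | nil => intro p c; simp [pvCnt]
  | cons l ls ih =>
      intro p c
      rw [List.foldl_cons]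
      show ls.foldl _ (p ++ [if pvAbre l then c + 1 else c], if pvAbre l then c + 1 else c) = _
      rw [ih]
      have ha : ∀ k : Nat, ((if pvAbre l then c + 1 else c) + (pvCnt ls k : Int))
          = c + (pvCnt (l :: ls) (k + 1) : Int) := by
        intro k
        rw [pvCnt_cons]
        push_cast
        split <;> ring
      simp only [List.length_cons, List.range_succ_eq_map, List.map_cons, List.map_map,
        Prod.mk.injEq]
      constructor
      · rw [List.append_assoc, List.singleton_append]
        refine congrArg (p ++ ·) ?_
        refine congrArg₂ List.cons ?_ ?_
        · have := ha 0
          simpa [pvCnt] using this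
        · apply List.map_congr_left
          intro k _
          simp only [Function.comp_apply, Nat.succ_eq_add_one]
          exact ha (k + 1)
      · rw [ha ls.length]

-- characterization of B's last-terminator table
theorem pvLt_spec (ls : List String) : ∀ (m : Nat),
    (PySem.List.pyRange 0 (m : Int) 1).foldl (fun (st : List Int × Int) i =>
        let v := if pvTerm (PySem.List.pyGetD ls i "") then i + 1 else st.2
        (st.1 ++ [v], v)) ([0], 0)
      = ((List.range (m + 1)).map (fun k => (pvLT ls k : Int)), (pvLT ls m : Int)) := by
  intro m
  induction m with
  | zero => simp [pvLT, PySem.List.pyRange_zero_nat]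
  | succ m ih =>
      have hsplit : PySem.List.pyRange 0 ((m + 1 : Nat) : Int) 1
          = PySem.List.pyRange 0 (m : Int) 1 ++ [(m : Int)] := by
        have : ((m + 1 : Nat) : Int) = (m : Int) + 1 := by push_cast; ring
        rw [this]
        exact PySem.List.pyRange_one_succ_right (by exact_mod_cast Nat.zero_le m)
      rw [hsplit, List.foldl_append, ih]
      simp only [List.foldl_cons, List.foldl_nil, PySem.List.pyGetD_natCast]
      have hv : (if pvTerm (ls.getD m "") then (m : Int) + 1 else (pvLT ls m : Int))
          = (pvLT ls (m + 1) : Int) := by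
        simp only [pvLT]
        split <;> push_cast <;> ring
      rw [hv, List.range_succ (n := m + 1), List.map_append]
      simp

-- B's stateless indexed filter equals A's carried-flag machine
theorem pvB_filter (ls : List String) (cond : Int → Bool)
    (hcond : ∀ i : Nat, i < ls.length → cond (i : Int) = !(pvF ls i || pvAbre (ls.getD i ""))) :
    ∀ (tail : List String) (i : Nat), ls.drop i = tail →
    ((PySem.List.enumerate tail (i : Int)).filter (fun p => cond p.1)).map (·.2)
      = pvRun (pvF ls i) tail := by
  intro tail
  induction tail with
  | nil => intro i _; simp [pvRun, PySem.List.enumerate_nil]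
  | cons l tail ih =>
      intro i hdrop
      have hi : i < ls.length := by
        by_contra hge
        rw [List.drop_eq_nil_of_le (by omega)] at hdrop
        simp at hdrop
      have hcons := List.drop_eq_getElem_cons hi
      rw [hcons] at hdrop
      have hl : ls[i] = l := (List.cons.injEq _ _ _ _ ▸ hdrop).1
      have htail : ls.drop (i + 1) = tail := (List.cons.injEq _ _ _ _ ▸ hdrop).2
      have hget : ls.getD i "" = l := by rw [List.getD_eq_getElem ls "" hi, hl]
      have hflag : pvF ls (i + 1) = ((pvF ls i || pvAbre l) && !pvTerm l) := by
        simp only [pvF, hget]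
      have hih := ih (i + 1) htail
      have hcast : ((i + 1 : Nat) : Int) = (i : Int) + 1 := by push_cast; ring
      rw [hcast] at hih
      have hc : cond (i : Int) = !(pvF ls i || pvAbre l) := by rw [hcond i hi, hget]
      rw [PySem.List.enumerate_cons, List.filter_cons]
      cases hg : (pvF ls i || pvAbre l) with
      | false =>
          simp only [hc, hg, Bool.not_false, reduceIte, List.map_cons]
          rw [hih, hflag, hg]
          simp only [Bool.false_and]
          simp only [pvRun, hg, Bool.false_eq_true, if_false]
      | true =>
          simp only [hc, hg, Bool.not_true, Bool.false_eq_true, reduceIte]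
          rw [hih, hflag, hg]
          simp only [Bool.true_and]
          simp only [pvRun, hg, if_true]

theorem filtrar_sql_spec : Claim_equal_filtrar_sql := by
  intro c _
  show filtrar_sql c = filtrar_sql_alt c
  simp only [filtrar_sql, filtrar_sql_alt]
  set ls := (PySem.Str.split? c "\n").getD [] with hls
  congr 1
  rw [pvFoldl_run, List.nil_append]
  rcases Nat.eq_zero_or_pos ls.length with hlen | hlen
  · rw [List.eq_nil_of_length_eq_zero hlen]
    simp [pvRun, PySem.List.enumerate_nil]
  · -- rewrite the two tables
    have hn1 : (PySem.List.len ls) - 1 = ((ls.length - 1 : Nat) : Int) := by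
      simp only [PySem.List.len_eq]
      omega
    rw [hn1, pvLt_spec ls (ls.length - 1), pvPf_spec ls [0] 0,
      Nat.sub_add_cancel hlen]
    simp only [zero_add]
    have hpf : ((0 : Int) :: (List.range ls.length).map (fun k => (pvCnt ls (k + 1) : Int)))
        = (List.range (ls.length + 1)).map (fun k => (pvCnt ls k : Int)) := by
      rw [List.range_succ_eq_map, List.map_cons, List.map_map]
      simp [pvCnt, Function.comp_def]
    rw [List.singleton_append, hpf]
    have hcond : ∀ i : Nat, i < ls.length →
        (PySem.List.pyGetD ((List.range (ls.length + 1)).map (fun k => (pvCnt ls k : Int))) ((i : Int) + 1) 0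
          == PySem.List.pyGetD ((List.range (ls.length + 1)).map (fun k => (pvCnt ls k : Int)))
               (PySem.List.pyGetD ((List.range ls.length).map (fun k => (pvLT ls k : Int))) (i : Int) 0) 0)
        = !(pvF ls i || pvAbre (ls.getD i "")) := by
      intro i hi
      have hlt : PySem.List.pyGetD ((List.range ls.length).map (fun k => (pvLT ls k : Int))) (i : Int) 0
          = ((pvLT ls i : Nat) : Int) := by
        rw [PySem.List.pyGetD_natCast, pvGetD_map_range _ _ _ hi]
      have hc1 : ((i : Int) + 1) = ((i + 1 : Nat) : Int) := by push_cast; ring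
      rw [hlt, hc1, PySem.List.pyGetD_natCast, PySem.List.pyGetD_natCast,
        pvGetD_map_range _ _ _ (by omega), pvGetD_map_range _ _ _ (by have := pvLT_le ls i; omega)]
      have hget : ls.getD i "" = ls[i] := List.getD_eq_getElem ls "" hi
      have h2 := pvCnt_succ ls i hi
      have h3 := pvCnt_mono ls (pvLT_le ls i)
      rw [pvF_eq ls i hi.le, hget]
      apply pvBoolExt
      cases ha : pvAbre ls[i] <;> simp_all <;> omega
    have hB := pvB_filter ls
        (fun j => (PySem.List.pyGetD ((List.range (ls.length + 1)).map (fun k => (pvCnt ls k : Int))) (j + 1) 0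
          == PySem.List.pyGetD ((List.range (ls.length + 1)).map (fun k => (pvCnt ls k : Int)))
               (PySem.List.pyGetD ((List.range ls.length).map (fun k => (pvLT ls k : Int))) j 0) 0))
        hcond ls 0 rfl
    simp only [Nat.cast_zero] at hB
    exact hB.symm
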